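-- pv_equiv track=rewrite | github.com/hackeshackes/ai-platform | backend/security/compliance.py | validate_data_classification
-- ===== SOURCE A (Python) =====
-- from enum import Enum
-- from typing import Any, Dict, List, Optional, Tuple
--
-- class DataCategory(str, Enum):
--     """数据类别"""
--     PERSONAL = "personal"
--     SENSITIVE = "sensitive"
--     FINANCIAL = "financial"
--     HEALTH = "health"
--     BIOMETRIC = "biometric"
--     GENETIC = "genetic"
--     LOCATION = "location"
--     CHILDREN = "children"
--     PUBLIC = "public"
--
-- def validate_data_classification(
--
--     data: Dict[str, Any]
-- ) -> Dict[DataCategory, List[str]]: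
--     """
--     验证数据分类
--
--     Args:
--         data: 待分类的数据
--
--     Returns:
--         数据类别映射
--     """
--     classification: Dict[DataCategory, List[str]] = {
--         DataCategory.PERSONAL: [],
--         DataCategory.SENSITIVE: [],
--         DataCategory.FINANCIAL: [],
--         DataCategory.HEALTH: [],
--         DataCategory.BIOMETRIC: [],
--         DataCategory.GENETIC: [],
--         DataCategory.LOCATION: [],
--         DataCategory.CHILDREN: [],
--         DataCategory.PUBLIC: []
--     }
--
--     patterns = {
--         DataCategory.PERSONAL: ["name", "email", "phone", "address"],
--         DataCategory.SENSITIVE: ["password", "secret", "token"],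
--         DataCategory.FINANCIAL: ["card_number", "cvv", "bank_account"],
--         DataCategory.HEALTH: ["diagnosis", "medical", "health", "disease"],
--         DataCategory.BIOMETRIC: ["fingerprint", "face", "voice", "biometric"],
--         DataCategory.GENETIC: ["genetic", "dna", "chromosome"],
--         DataCategory.LOCATION: ["gps", "latitude", "longitude", "location"],
--         DataCategory.CHILDREN: ["child", "minor", "age"]
--     }
--
--     for field_name in data.keys():
--         field_lower = field_name.lower()
--
--         for category, keywords in patterns.items():
--             if any(kw in field_lower for kw in keywords):
--                 classification[category].append(field_name)
--                 break
--
--     # 清理空类别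
--     return {k: v for k, v in classification.items() if v}
-- ===== SOURCE B (Python) =====
-- def validate_data_classification(data):
--     patterns = {
--         "personal": ["name", "email", "phone", "address"],
--         "sensitive": ["password", "secret", "token"],
--         "financial": ["card_number", "cvv", "bank_account"],
--         "health": ["diagnosis", "medical", "health", "disease"],
--         "biometric": ["fingerprint", "face", "voice", "biometric"],
--         "genetic": ["genetic", "dna", "chromosome"],
--         "location": ["gps", "latitude", "longitude", "location"],
--         "children": ["child", "minor", "age"],
--     }
--     result = {}
--     assigned = set()
--     for category, keywords in patterns.items():
--         fields = [f for f in data.keys()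
--                   if f not in assigned and any(kw in f.lower() for kw in keywords)]
--         if fields:
--             assigned.update(fields)
--             result[category] = fields
--     return result
-- ===== Notes on version B (the rewrite author's own statement) =====
-- stated objective: alternative
-- what changed: B iterates category-major over the pattern table with an `assigned` set (collecting per category the still-unassigned matching fields) instead of A's field-major loop with a break and per-category append, and builds the result only from non-empty categories instead of pruning a pre-filled dict.
import Mathlib
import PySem

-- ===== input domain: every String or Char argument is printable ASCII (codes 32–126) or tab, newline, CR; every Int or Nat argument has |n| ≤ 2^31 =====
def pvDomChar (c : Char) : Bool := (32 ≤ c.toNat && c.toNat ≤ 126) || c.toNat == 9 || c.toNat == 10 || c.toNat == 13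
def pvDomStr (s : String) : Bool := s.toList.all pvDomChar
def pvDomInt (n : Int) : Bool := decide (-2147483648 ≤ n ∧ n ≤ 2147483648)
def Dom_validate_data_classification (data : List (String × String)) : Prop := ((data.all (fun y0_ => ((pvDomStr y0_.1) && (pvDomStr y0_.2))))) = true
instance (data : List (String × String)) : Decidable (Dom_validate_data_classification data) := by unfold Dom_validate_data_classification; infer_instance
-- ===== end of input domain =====

-- B re-implements the field-major classify-with-break loop category-major with an `assigned` set
-- (objective: alternative decomposition, same cost); equivalence of the two traversal orders is proved below.

-- shared constant table (the `patterns` literal both Pythons contain)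
def pvPatterns : List (String × List String) :=
  [("personal", ["name", "email", "phone", "address"]),
   ("sensitive", ["password", "secret", "token"]),
   ("financial", ["card_number", "cvv", "bank_account"]),
   ("health", ["diagnosis", "medical", "health", "disease"]),
   ("biometric", ["fingerprint", "face", "voice", "biometric"]),
   ("genetic", ["genetic", "dna", "chromosome"]),
   ("location", ["gps", "latitude", "longitude", "location"]),
   ("children", ["child", "minor", "age"])]

-- ===== PORT A =====
-- loop body of A: first pattern category whose keyword occurs in field_lower gets the field appended (the `break`)
-- (field_lower := field_name.lower(), written inline)
def pvStepA (cl : PySem.Dict String (List String)) (field_name : String) : PySem.Dict String (List String) :=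
  match pvPatterns.find? (fun p => p.2.any (fun kw => PySem.Str.isIn kw (PySem.Str.lower field_name))) with
  | some p => cl.modify p.1 [] (fun v => v ++ [field_name])
  | none => cl

-- classification starts as the nine-category dict of empty lists;
-- data.keys(): the dict's keys are the first occurrences of the fields, in order
def validate_data_classification (data : List (String × String)) : List (String × List String) :=
  (((PySem.List.dedup (data.map (fun kv => kv.1))).foldl pvStepA
    (PySem.Dict.ofList [("personal", []), ("sensitive", []), ("financial", []), ("health", []),
      ("biometric", []), ("genetic", []), ("location", []), ("children", []),
      ("public", [])])).items).filter (fun kv => !kv.2.isEmpty)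

-- ===== PORT B =====
-- loop body of B: collect the still-unassigned fields matching this category's keywords
-- fields = [f for f in keys if f not in assigned and any(kw in f.lower() for kw in keywords)]
def pvFields (keys : List String) (assigned : PySem.Set String) (p : String × List String) : List String :=
  keys.filter (fun f =>
    !(PySem.Set.contains assigned f) && p.2.any (fun kw => PySem.Str.isIn kw (PySem.Str.lower f)))

def pvStepB (keys : List String) (st : List (String × List String) × PySem.Set String)
    (p : String × List String) : List (String × List String) × PySem.Set String :=
  if (pvFields keys st.2 p).isEmpty then st
  else (st.1 ++ [(p.1, pvFields keys st.2 p)], PySem.Set.update st.2 (pvFields keys st.2 p))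

def validate_data_classification_alt (data : List (String × String)) : List (String × List String) :=
  (pvPatterns.foldl (pvStepB (PySem.List.dedup (data.map (fun kv => kv.1))))
    ([], PySem.Set.empty)).1

-- ===== PRECONDITION & SPEC =====
def Spec_validate_data_classification (data : List (String × String)) (out : List (String × List String)) : Prop := out = validate_data_classification_alt data
instance (data : List (String × String)) (out : List (String × List String)) : Decidable (Spec_validate_data_classification data out) := by unfold Spec_validate_data_classification; infer_instance

-- ===== CLAIM (what is proved, stated in full; the proofs are below) =====
def Claim_equal_validate_data_classification : Prop := ∀ (data : List (String × String)), Dom_validate_data_classification data → Spec_validate_data_classification data (validate_data_classification data)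

-- ===== LEMMAS AND PROOFS =====

-- the keyword predicate of both programs, and the first matching category of a field
def pvPred (f : String) (p : String × List String) : Bool :=
  p.2.any (fun kw => PySem.Str.isIn kw (PySem.Str.lower f))

def pvMatch (f : String) : Option String := (pvPatterns.find? (pvPred f)).map Prod.fst

lemma afold_getD (ks : List String) (d : PySem.Dict String (List String)) (c : String) :
    (ks.foldl pvStepA d).getD c [] = d.getD c [] ++ ks.filter (fun f => pvMatch f == some c) := by
  induction ks generalizing d with
  | nil => simp
  | cons f ks ih =>
    rw [List.foldl_cons, ih, List.filter_cons]
    simp only [pvMatch]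
    unfold pvStepA
    rw [show (fun p : String × List String => p.2.any fun kw => PySem.Str.isIn kw (PySem.Str.lower f)) = pvPred f from rfl]
    cases h : pvPatterns.find? (pvPred f) with
    | none => simp
    | some p =>
      by_cases hc : p.1 = c
      · subst hc
        rw [PySem.Dict.getD_modify_self]
        simp
      · rw [PySem.Dict.getD_modify_of_ne d [] _ (fun he => hc he.symm)]
        simp [hc]

lemma afold_keys (ks : List String) (d : PySem.Dict String (List String))
    (h : ∀ p ∈ pvPatterns, d.contains p.1 = true) :
    (ks.foldl pvStepA d).keys = d.keys := by
  induction ks generalizing d with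
  | nil => rfl
  | cons f ks ih =>
    rw [List.foldl_cons]
    have hstep : (pvStepA d f).keys = d.keys := by
      unfold pvStepA
      cases hf : pvPatterns.find? (fun p => p.2.any (fun kw => PySem.Str.isIn kw (PySem.Str.lower f))) with
      | none => rfl
      | some p =>
        have hp : p ∈ pvPatterns := List.mem_of_find?_eq_some hf
        rw [PySem.Dict.keys_modify, PySem.Dict.keys_insert_of_contains _ _ (h p hp)]
    rw [ih _ (fun p hp => by
      rw [PySem.Dict.contains_iff_mem_keys, hstep, ← PySem.Dict.contains_iff_mem_keys]
      exact h p hp), hstep]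

lemma pvMatch_split (done ps : List (String × List String)) (p : String × List String)
    (f : String) (hsplit : pvPatterns = done ++ p :: ps) :
    (pvMatch f == some p.1) = (!done.any (pvPred f) && pvPred f p) := by
  have hnd : (pvPatterns.map Prod.fst).Nodup := by decide
  rw [hsplit] at hnd
  simp only [List.map_append, List.map_cons, List.nodup_append, List.nodup_cons] at hnd
  unfold pvMatch
  rw [hsplit, List.find?_append]
  cases hd : done.find? (pvPred f) with
  | some q =>
    have hq : q ∈ done := List.mem_of_find?_eq_some hd
    have hqp : pvPred f q = true := List.find?_some hd
    have hne : q.1 ≠ p.1 :=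
      hnd.2.2 q.1 (List.mem_map_of_mem hq) p.1 List.mem_cons_self
    have ha : done.any (pvPred f) = true := List.any_eq_true.mpr ⟨q, hq, hqp⟩
    simp [ha, hne]
  | none =>
    have hany : done.any (pvPred f) = false :=
      List.any_eq_false.mpr (List.find?_eq_none.mp hd)
    rw [Option.none_or, hany, List.find?_cons]
    cases hp : pvPred f p with
    | true => simp
    | false =>
      cases hr : ps.find? (pvPred f) with
      | none => simp
      | some r =>
        have hr' : r ∈ ps := List.mem_of_find?_eq_some hr
        have : r.1 ≠ p.1 := fun he => hnd.2.1.1 (he ▸ List.mem_map_of_mem hr')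
        simp [this]

lemma bfold (keys : List String) (ps done : List (String × List String))
    (res : List (String × List String)) (s : PySem.Set String)
    (hsplit : pvPatterns = done ++ ps)
    (hs : ∀ f, PySem.Set.contains s f = true ↔ f ∈ keys ∧ ∃ q ∈ done, pvPred f q = true) :
    (ps.foldl (pvStepB keys) (res, s)).1 =
      res ++ (ps.map (fun p => (p.1, keys.filter (fun f => pvMatch f == some p.1)))).filter
        (fun kv => !kv.2.isEmpty) := by
  induction ps generalizing done res s with
  | nil => simp
  | cons p ps ih =>
    have hcont : ∀ f ∈ keys, PySem.Set.contains s f = done.any (pvPred f) := by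
      intro f hf
      cases hcf : PySem.Set.contains s f with
      | true =>
        obtain ⟨-, q, hq, hqp⟩ := (hs f).mp hcf
        exact (List.any_eq_true.mpr ⟨q, hq, hqp⟩).symm
      | false =>
        cases ha : done.any (pvPred f) with
        | false => rfl
        | true =>
          obtain ⟨q, hq, hqp⟩ := List.any_eq_true.mp ha
          rw [(hs f).mpr ⟨hf, q, hq, hqp⟩] at hcf
          cases hcf
    have hfeq : pvFields keys s p = keys.filter (fun f => pvMatch f == some p.1) := by
      unfold pvFields
      apply List.filter_congr
      intro f hf
      show (!(PySem.Set.contains s f) && pvPred f p) = (pvMatch f == some p.1)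
      rw [pvMatch_split done ps p f hsplit, hcont f hf]
    have hsplit' : pvPatterns = (done ++ [p]) ++ ps := by rw [hsplit]; simp
    rw [List.foldl_cons]
    by_cases hemp : (pvFields keys s p).isEmpty = true
    · have hnil : pvFields keys s p = [] := by simpa [List.isEmpty_iff] using hemp
      have hall : ∀ g ∈ keys, ¬((!(PySem.Set.contains s g) && pvPred g p) = true) := by
        intro g hg
        exact List.filter_eq_nil_iff.mp hnil g hg
      have hstep : pvStepB keys (res, s) p = (res, s) := by simp [pvStepB, hemp]
      have hs' : ∀ f, PySem.Set.contains s f = true ↔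
          f ∈ keys ∧ ∃ q ∈ done ++ [p], pvPred f q = true := by
        intro f
        rw [hs f]
        constructor
        · rintro ⟨hf, q, hq, hqp⟩
          exact ⟨hf, q, List.mem_append_left _ hq, hqp⟩
        · rintro ⟨hf, q, hq, hqp⟩
          rcases List.mem_append.mp hq with h | h
          · exact ⟨hf, q, h, hqp⟩
          · simp only [List.mem_singleton] at h
            subst h
            have hcsf : PySem.Set.contains s f = true := by
              by_contra hc
              rw [Bool.not_eq_true] at hc
              exact hall f hf (by rw [hc, hqp]; rfl)
            exact ⟨hf, (hs f).mp hcsf |>.2⟩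
      rw [hstep, ih (done ++ [p]) res s hsplit' hs']
      simp [← hfeq, hnil]
    · rw [Bool.not_eq_true] at hemp
      have hne : pvFields keys s p ≠ [] := by
        intro h
        rw [h] at hemp
        cases hemp
      have hstep : pvStepB keys (res, s) p =
          (res ++ [(p.1, pvFields keys s p)], PySem.Set.update s (pvFields keys s p)) := by
        simp [pvStepB, hemp]
      have hs' : ∀ f, PySem.Set.contains (PySem.Set.update s (pvFields keys s p)) f = true ↔
          f ∈ keys ∧ ∃ q ∈ done ++ [p], pvPred f q = true := by
        intro f
        rw [PySem.Set.contains_iff, PySem.Set.mem_update]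
        constructor
        · rintro (hm | hm)
          · obtain ⟨hf, q, hq, hqp⟩ := (hs f).mp ((PySem.Set.contains_iff s f).mpr hm)
            exact ⟨hf, q, List.mem_append_left _ hq, hqp⟩
          · have hmf := List.mem_filter.mp hm
            have hpp : pvPred f p = true := (Bool.and_eq_true _ _ |>.mp hmf.2).2
            exact ⟨hmf.1, p, List.mem_append_right _ (List.mem_singleton.mpr rfl), hpp⟩
        · rintro ⟨hf, q, hq, hqp⟩
          rcases List.mem_append.mp hq with h | h
          · exact Or.inl ((PySem.Set.contains_iff s f).mp ((hs f).mpr ⟨hf, q, h, hqp⟩))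
          · simp only [List.mem_singleton] at h
            subst h
            cases hcsf : PySem.Set.contains s f with
            | true => exact Or.inl ((PySem.Set.contains_iff s f).mp hcsf)
            | false =>
              refine Or.inr (List.mem_filter.mpr ⟨hf, ?_⟩)
              show (!(PySem.Set.contains s f) && pvPred f _) = true
              rw [hcsf, hqp]
              rfl
      rw [hstep, ih (done ++ [p]) _ _ hsplit' hs']
      simp [← hfeq, hne]
def pvKeysOf (data : List (String × String)) : List String :=
  PySem.List.dedup (data.map (fun kv => kv.1))

def pvTable (keys : List String) : List (String × List String) :=
  pvPatterns.map (fun p => (p.1, keys.filter (fun f => pvMatch f == some p.1)))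

lemma pvMatch_ne_public (f : String) : (pvMatch f == some "public") = false := by
  unfold pvMatch
  cases h : pvPatterns.find? (pvPred f) with
  | none => rfl
  | some q =>
    have hq := List.mem_of_find?_eq_some h
    fin_cases hq <;> rfl

lemma pub_filter_nil (keys : List String) :
    keys.filter (fun f => pvMatch f == some "public") = [] :=
  List.filter_eq_nil_iff.mpr (fun f _ => by simp [pvMatch_ne_public])

lemma b_eq (data : List (String × String)) :
    validate_data_classification_alt data
      = (pvTable (pvKeysOf data)).filter (fun kv => !kv.2.isEmpty) := by
  unfold validate_data_classification_alt pvTable pvKeysOf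
  rw [bfold _ pvPatterns [] [] PySem.Set.empty rfl (by intro f; simp [PySem.Set.empty, PySem.Set.contains])]
  simp

lemma a_eq (data : List (String × String)) :
    validate_data_classification data
      = (pvTable (pvKeysOf data)
          ++ [("public", (pvKeysOf data).filter (fun f => pvMatch f == some "public"))]).filter
          (fun kv => !kv.2.isEmpty) := by
  unfold validate_data_classification
  have hk := afold_keys (PySem.List.dedup (data.map (fun kv => kv.1)))
    (PySem.Dict.ofList [("personal", []), ("sensitive", []), ("financial", []), ("health", []),
      ("biometric", []), ("genetic", []), ("location", []), ("children", []), ("public", [])])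
    (by decide)
  have hnd : ((PySem.List.dedup (data.map (fun kv => kv.1))).foldl pvStepA
      (PySem.Dict.ofList [("personal", []), ("sensitive", []), ("financial", []), ("health", []),
        ("biometric", []), ("genetic", []), ("location", []), ("children", []),
        ("public", [])])).keys.Nodup := by
    rw [hk]; decide
  rw [PySem.Dict.items_eq_map_keys _ hnd [], hk]
  simp only [pvTable, pvKeysOf, pvPatterns]
  simp only [show (PySem.Dict.ofList [("personal", ([] : List String)), ("sensitive", []), ("financial", []), ("health", []),
      ("biometric", []), ("genetic", []), ("location", []), ("children", []), ("public", [])]).keys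
      = ["personal", "sensitive", "financial", "health", "biometric", "genetic", "location", "children", "public"] from rfl]
  simp only [List.map_cons, List.map_nil, afold_getD]
  rfl

-- ===== VERDICT (by name: the statement is the Claim_ definition above) =====
theorem validate_data_classification_spec : Claim_equal_validate_data_classification := by
  intro data _
  show validate_data_classification data = validate_data_classification_alt data
  rw [a_eq, b_eq, pub_filter_nil, List.filter_append]
  simp
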